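-- pv_equiv track=rewrite | github.com/stoatmagoats/autoresearch-midi | prepare.py | detect_chord
-- ===== SOURCE A (Python) =====
-- def detect_chord(pitches):
--     """Given a list of MIDI pitches, detect the most likely chord.
--     Returns (root_pc, quality_idx) or None."""
--     if len(pitches) < 2:
--         return None
--     # Pitch class histogram
--     pc_hist = [0] * 12
--     for p in pitches:
--         pc_hist[p % 12] += 1
--     # Template matching against chord templates
--     templates = {
--         'maj': [1, 0, 0, 0, 1, 0, 0, 1, 0, 0, 0, 0],  # root, M3, P5
--         'min': [1, 0, 0, 1, 0, 0, 0, 1, 0, 0, 0, 0],  # root, m3, P5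
--         'dim': [1, 0, 0, 1, 0, 0, 1, 0, 0, 0, 0, 0],  # root, m3, d5
--         'aug': [1, 0, 0, 0, 1, 0, 0, 0, 1, 0, 0, 0],  # root, M3, A5
--         'dom7': [1, 0, 0, 0, 1, 0, 0, 1, 0, 0, 1, 0], # root, M3, P5, m7
--     }
--     best_score, best_root, best_qual = -1, 0, 0
--     for root in range(12):
--         for qi, (qname, template) in enumerate(templates.items()):
--             # Rotate template to this root
--             rotated = template[-root:] + template[:-root]
--             score = sum(a * b for a, b in zip(pc_hist, rotated))
--             if score > best_score:
--                 best_score = score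
--                 best_root = root
--                 best_qual = qi
--     return (best_root, best_qual) if best_score >= 2 else None
-- ===== SOURCE B (Python) =====
-- # Scatter voting instead of template matching: each pitch class votes its count into
-- # every (root, quality) candidate containing it, via a precomputed inverted delta table.
-- _QUALITY_OFFSETS = [(0, 4, 7), (0, 3, 7), (0, 3, 6), (0, 4, 8), (0, 4, 7, 10)]
-- _VOTE_DELTAS = [((-o) % 12, qi)
--                 for qi, offs in enumerate(_QUALITY_OFFSETS)
--                 for o in offs]
--
-- def detect_chord(pitches):
--     if len(pitches) < 2:
--         return None
--     hist = [0] * 12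
--     for p in pitches:
--         hist[p % 12] += 1
--     score = [[0] * 5 for _ in range(12)]
--     for pc, cnt in enumerate(hist):
--         for d, qi in _VOTE_DELTAS:
--             score[(pc + d) % 12][qi] += cnt
--     s, r, q = max(((score[r][q], r, q) for r in range(12) for q in range(5)),
--                   key=lambda c: c[0])
--     return (r, q) if s >= 2 else None
-- ===== Notes on version B (the rewrite author's own statement) =====
-- stated objective: alternative
-- what changed: A gathers: for each of the 12 roots it rotates each 12-bin 0/1 template and takes a dot product with the histogram; B scatters: each occupied pitch class votes its count into every (root, quality) candidate containing it via a precomputed inverted delta table, and the winner is the first maximum of the vote table.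
import Mathlib
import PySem

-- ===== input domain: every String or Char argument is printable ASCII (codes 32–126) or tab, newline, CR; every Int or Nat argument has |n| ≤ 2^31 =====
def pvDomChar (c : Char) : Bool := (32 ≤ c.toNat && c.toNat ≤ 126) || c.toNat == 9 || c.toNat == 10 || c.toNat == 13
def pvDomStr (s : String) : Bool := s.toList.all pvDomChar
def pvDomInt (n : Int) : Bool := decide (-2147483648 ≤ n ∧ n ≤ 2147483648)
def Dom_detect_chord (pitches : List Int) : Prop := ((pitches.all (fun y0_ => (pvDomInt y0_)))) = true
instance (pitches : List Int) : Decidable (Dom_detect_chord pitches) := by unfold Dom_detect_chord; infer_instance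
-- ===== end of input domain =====

-- B replaces A's per-root template rotation + dot-product gathering by scatter voting:
-- each pitch class votes its count into every (root, quality) candidate containing it,
-- via a precomputed inverted delta table (objective: alternative).

-- ===== PORT A =====
-- templates.items() in insertion order
def templatesA : List (String × List Int) :=
  [("maj",  [1, 0, 0, 0, 1, 0, 0, 1, 0, 0, 0, 0]),
   ("min",  [1, 0, 0, 1, 0, 0, 0, 1, 0, 0, 0, 0]),
   ("dim",  [1, 0, 0, 1, 0, 0, 1, 0, 0, 0, 0, 0]),
   ("aug",  [1, 0, 0, 0, 1, 0, 0, 0, 1, 0, 0, 0]),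
   ("dom7", [1, 0, 0, 0, 1, 0, 0, 1, 0, 0, 1, 0])]

def detect_chord (pitches : List Int) : Option (Int × Int) :=
  if pitches.length < 2 then none
  else
    let pc_hist := pitches.foldl
      (fun h p => PySem.List.pySetD h (PySem.Int.mod p 12)
        (PySem.List.pyGetD h (PySem.Int.mod p 12) 0 + 1))
      (List.replicate 12 (0 : Int))
    let best := (PySem.List.pyRange 0 12 1).foldl
      (fun st root =>
        (PySem.List.enumerate templatesA 0).foldl
          (fun st qt =>
            let rotated := PySem.List.slice qt.2.2 (some (-root)) none
                           ++ PySem.List.slice qt.2.2 none (some (-root))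
            let score := (pc_hist.zip rotated).foldl (fun s ab => s + ab.1 * ab.2) (0 : Int)
            if score > st.1 then (score, root, qt.1) else st)
          st)
      ((-1 : Int), (0 : Int), (0 : Int))
    if best.1 ≥ 2 then some (best.2.1, best.2.2) else none

-- ===== PORT B =====
def qualitiesB : List (List Int) := [[0, 4, 7], [0, 3, 7], [0, 3, 6], [0, 4, 8], [0, 4, 7, 10]]

-- _VOTE_DELTAS: for each quality, the root deltas (-offset) % 12 of the candidates a pitch class belongs to
def voteDeltas : List (Int × Int) :=
  (PySem.List.enumerate qualitiesB 0).flatMap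
    (fun qo => qo.2.map (fun o => (PySem.Int.mod (-o) 12, qo.1)))

def detect_chord_alt (pitches : List Int) : Option (Int × Int) :=
  if pitches.length < 2 then none
  else
    let hist := pitches.foldl
      (fun h p => PySem.List.pySetD h (PySem.Int.mod p 12)
        (PySem.List.pyGetD h (PySem.Int.mod p 12) 0 + 1))
      (List.replicate 12 (0 : Int))
    -- score[(pc + d) % 12][qi] += cnt  for every (pc, cnt) of the histogram and every delta
    let score := (PySem.List.enumerate hist 0).foldl
      (fun tbl pcnt => voteDeltas.foldl
        (fun tbl dq =>
          let r := PySem.Int.mod (pcnt.1 + dq.1) 12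
          PySem.List.pySetD tbl r
            (PySem.List.pySetD (PySem.List.pyGetD tbl r []) dq.2
              (PySem.List.pyGetD (PySem.List.pyGetD tbl r []) dq.2 0 + pcnt.2)))
        tbl)
      (List.replicate 12 (List.replicate 5 (0 : Int)))
    -- max(..., key=lambda c: c[0]) keeps the FIRST maximum; the generator has 60 elements, so
    -- Python's max never raises and the none branch below is unreachable
    let cands := (PySem.List.pyRange 0 12 1).flatMap (fun r =>
      (PySem.List.pyRange 0 5 1).map (fun q =>
        (PySem.List.pyGetD (PySem.List.pyGetD score r []) q 0, r, q)))
    match PySem.List.max? cands (fun c => c.1) with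
    | some (s, r, q) => if s ≥ 2 then some (r, q) else none
    | none => none

-- ===== PRECONDITION & SPEC =====
def Spec_detect_chord (pitches : List Int) (out : Option (Int × Int)) : Prop := out = detect_chord_alt pitches
instance (pitches : List Int) (out : Option (Int × Int)) : Decidable (Spec_detect_chord pitches out) := by unfold Spec_detect_chord; infer_instance

-- ===== CLAIM (what is proved, stated in full; the proofs are below) =====
def Claim_equal_detect_chord : Prop := ∀ (pitches : List Int), Dom_detect_chord pitches → Spec_detect_chord pitches (detect_chord pitches)

-- ===== LEMMAS AND PROOFS =====

-- A's candidate list (score, root, quality index), flattened in A's traversal order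
def candA (h : List Int) : List (Int × Int × Int) :=
  (PySem.List.pyRange 0 12 1).flatMap (fun root =>
    (PySem.List.enumerate templatesA 0).map (fun qt =>
      ((h.zip (PySem.List.slice qt.2.2 (some (-root)) none ++ PySem.List.slice qt.2.2 none (some (-root)))).foldl (fun s ab => s + ab.1 * ab.2) (0 : Int),
       root, qt.1)))

-- B's vote table, exactly the fold in detect_chord_alt
def tableB (h : List Int) : List (List Int) :=
  (PySem.List.enumerate h 0).foldl
    (fun tbl pcnt => voteDeltas.foldl
      (fun tbl dq =>
        let r := PySem.Int.mod (pcnt.1 + dq.1) 12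
        PySem.List.pySetD tbl r
          (PySem.List.pySetD (PySem.List.pyGetD tbl r []) dq.2
            (PySem.List.pyGetD (PySem.List.pyGetD tbl r []) dq.2 0 + pcnt.2)))
      tbl)
    (List.replicate 12 (List.replicate 5 (0 : Int)))

-- B's candidate list, exactly the expression in detect_chord_alt
def candB2 (h : List Int) : List (Int × Int × Int) :=
  (PySem.List.pyRange 0 12 1).flatMap (fun r =>
    (PySem.List.pyRange 0 5 1).map (fun q =>
      (PySem.List.pyGetD (PySem.List.pyGetD (tableB h) r []) q 0, r, q)))

-- the common value of both candidate lists on a 12-entry histogram (B's summand order, simp-normal)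
def canonCands (a b c d e f g i j k l m : Int) : List (Int × Int × Int) :=
  [(a + e + i, 0, 0),
 (a + d + i, 0, 1),
 (a + d + g, 0, 2),
 (a + e + j, 0, 3),
 (a + e + i + l, 0, 4),
 (b + f + j, 1, 0),
 (b + e + j, 1, 1),
 (b + e + i, 1, 2),
 (b + f + k, 1, 3),
 (b + f + j + m, 1, 4),
 (c + g + k, 2, 0),
 (c + f + k, 2, 1),
 (c + f + j, 2, 2),
 (c + g + l, 2, 3),
 (a + c + g + k, 2, 4),
 (d + i + l, 3, 0),
 (d + g + l, 3, 1),
 (d + g + k, 3, 2),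
 (d + i + m, 3, 3),
 (b + d + i + l, 3, 4),
 (e + j + m, 4, 0),
 (e + i + m, 4, 1),
 (e + i + l, 4, 2),
 (a + e + j, 4, 3),
 (c + e + j + m, 4, 4),
 (a + f + k, 5, 0),
 (a + f + j, 5, 1),
 (f + j + m, 5, 2),
 (b + f + k, 5, 3),
 (a + d + f + k, 5, 4),
 (b + g + l, 6, 0),
 (b + g + k, 6, 1),
 (a + g + k, 6, 2),
 (c + g + l, 6, 3),
 (b + e + g + l, 6, 4),
 (c + i + m, 7, 0),
 (c + i + l, 7, 1),
 (b + i + l, 7, 2),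
 (d + i + m, 7, 3),
 (c + f + i + m, 7, 4),
 (a + d + j, 8, 0),
 (d + j + m, 8, 1),
 (c + j + m, 8, 2),
 (a + e + j, 8, 3),
 (a + d + g + j, 8, 4),
 (b + e + k, 9, 0),
 (a + e + k, 9, 1),
 (a + d + k, 9, 2),
 (b + f + k, 9, 3),
 (b + e + i + k, 9, 4),
 (c + f + l, 10, 0),
 (b + f + l, 10, 1),
 (b + e + l, 10, 2),
 (c + g + l, 10, 3),
 (c + f + j + l, 10, 4),
 (d + g + m, 11, 0),
 (c + g + m, 11, 1),
 (c + f + m, 11, 2),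
 (d + i + m, 11, 3),
 (d + g + k + m, 11, 4)]

def voteStep (tbl : List (List Int)) (pc cnt : Int) : List (List Int) :=
  voteDeltas.foldl
    (fun tbl dq =>
      let r := PySem.Int.mod (pc + dq.1) 12
      PySem.List.pySetD tbl r
        (PySem.List.pySetD (PySem.List.pyGetD tbl r []) dq.2
          (PySem.List.pyGetD (PySem.List.pyGetD tbl r []) dq.2 0 + cnt)))
    tbl

lemma voteDeltas_eq : voteDeltas =
  [(0,0),(8,0),(5,0),(0,1),(9,1),(5,1),(0,2),(9,2),(6,2),(0,3),(8,3),(4,3),(0,4),(8,4),(5,4),(2,4)] := by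
  decide

lemma pyRange12_eq : PySem.List.pyRange 0 12 1 = [0,1,2,3,4,5,6,7,8,9,10,11] := by decide
lemma pyRange5_eq : PySem.List.pyRange 0 5 1 = [0,1,2,3,4] := by decide

lemma vstep0 (a : Int) :
    voteStep
    [[0, 0, 0, 0, 0],
     [0, 0, 0, 0, 0],
     [0, 0, 0, 0, 0],
     [0, 0, 0, 0, 0],
     [0, 0, 0, 0, 0],
     [0, 0, 0, 0, 0],
     [0, 0, 0, 0, 0],
     [0, 0, 0, 0, 0],
     [0, 0, 0, 0, 0],
     [0, 0, 0, 0, 0],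
     [0, 0, 0, 0, 0],
     [0, 0, 0, 0, 0]]
    0 a =
    [[a, a, a, a, a],
     [0, 0, 0, 0, 0],
     [0, 0, 0, 0, a],
     [0, 0, 0, 0, 0],
     [0, 0, 0, a, 0],
     [a, a, 0, 0, a],
     [0, 0, a, 0, 0],
     [0, 0, 0, 0, 0],
     [a, 0, 0, a, a],
     [0, a, a, 0, 0],
     [0, 0, 0, 0, 0],
     [0, 0, 0, 0, 0]] := by
  simp [voteStep, voteDeltas_eq, PySem.Int.mod, PySem.List.pySetD_of_nonneg,
    List.set, PySem.List.pyGetD_ofNat']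

lemma vstep1 (a b : Int) :
    voteStep
    [[a, a, a, a, a],
     [0, 0, 0, 0, 0],
     [0, 0, 0, 0, a],
     [0, 0, 0, 0, 0],
     [0, 0, 0, a, 0],
     [a, a, 0, 0, a],
     [0, 0, a, 0, 0],
     [0, 0, 0, 0, 0],
     [a, 0, 0, a, a],
     [0, a, a, 0, 0],
     [0, 0, 0, 0, 0],
     [0, 0, 0, 0, 0]]
    1 b =
    [[a, a, a, a, a],
     [b, b, b, b, b],
     [0, 0, 0, 0, a],
     [0, 0, 0, 0, b],
     [0, 0, 0, a, 0],
     [a, a, 0, b, a],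
     [b, b, a, 0, b],
     [0, 0, b, 0, 0],
     [a, 0, 0, a, a],
     [b, a, a, b, b],
     [0, b, b, 0, 0],
     [0, 0, 0, 0, 0]] := by
  simp [voteStep, voteDeltas_eq, PySem.Int.mod, PySem.List.pySetD_of_nonneg,
    List.set, PySem.List.pyGetD_ofNat']

lemma vstep2 (a b c : Int) :
    voteStep
    [[a, a, a, a, a],
     [b, b, b, b, b],
     [0, 0, 0, 0, a],
     [0, 0, 0, 0, b],
     [0, 0, 0, a, 0],
     [a, a, 0, b, a],
     [b, b, a, 0, b],
     [0, 0, b, 0, 0],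
     [a, 0, 0, a, a],
     [b, a, a, b, b],
     [0, b, b, 0, 0],
     [0, 0, 0, 0, 0]]
    2 c =
    [[a, a, a, a, a],
     [b, b, b, b, b],
     [c, c, c, c, a + c],
     [0, 0, 0, 0, b],
     [0, 0, 0, a, c],
     [a, a, 0, b, a],
     [b, b, a, c, b],
     [c, c, b, 0, c],
     [a, 0, c, a, a],
     [b, a, a, b, b],
     [c, b, b, c, c],
     [0, c, c, 0, 0]] := by
  simp [voteStep, voteDeltas_eq, PySem.Int.mod, PySem.List.pySetD_of_nonneg,
    List.set, PySem.List.pyGetD_ofNat']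

lemma vstep3 (a b c d : Int) :
    voteStep
    [[a, a, a, a, a],
     [b, b, b, b, b],
     [c, c, c, c, a + c],
     [0, 0, 0, 0, b],
     [0, 0, 0, a, c],
     [a, a, 0, b, a],
     [b, b, a, c, b],
     [c, c, b, 0, c],
     [a, 0, c, a, a],
     [b, a, a, b, b],
     [c, b, b, c, c],
     [0, c, c, 0, 0]]
    3 d =
    [[a, a + d, a + d, a, a],
     [b, b, b, b, b],
     [c, c, c, c, a + c],
     [d, d, d, d, b + d],
     [0, 0, 0, a, c],
     [a, a, 0, b, a + d],
     [b, b, a, c, b],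
     [c, c, b, d, c],
     [a + d, d, c, a, a + d],
     [b, a, a + d, b, b],
     [c, b, b, c, c],
     [d, c, c, d, d]] := by
  simp [voteStep, voteDeltas_eq, PySem.Int.mod, PySem.List.pySetD_of_nonneg,
    List.set, PySem.List.pyGetD_ofNat']

lemma vstep4 (a b c d e : Int) :
    voteStep
    [[a, a + d, a + d, a, a],
     [b, b, b, b, b],
     [c, c, c, c, a + c],
     [d, d, d, d, b + d],
     [0, 0, 0, a, c],
     [a, a, 0, b, a + d],
     [b, b, a, c, b],
     [c, c, b, d, c],
     [a + d, d, c, a, a + d],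
     [b, a, a + d, b, b],
     [c, b, b, c, c],
     [d, c, c, d, d]]
    4 e =
    [[a + e, a + d, a + d, a + e, a + e],
     [b, b + e, b + e, b, b],
     [c, c, c, c, a + c],
     [d, d, d, d, b + d],
     [e, e, e, a + e, c + e],
     [a, a, 0, b, a + d],
     [b, b, a, c, b + e],
     [c, c, b, d, c],
     [a + d, d, c, a + e, a + d],
     [b + e, a + e, a + d, b, b + e],
     [c, b, b + e, c, c],
     [d, c, c, d, d]] := by
  simp [voteStep, voteDeltas_eq, PySem.Int.mod, PySem.List.pySetD_of_nonneg,
    List.set, PySem.List.pyGetD_ofNat']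

lemma vstep5 (a b c d e f : Int) :
    voteStep
    [[a + e, a + d, a + d, a + e, a + e],
     [b, b + e, b + e, b, b],
     [c, c, c, c, a + c],
     [d, d, d, d, b + d],
     [e, e, e, a + e, c + e],
     [a, a, 0, b, a + d],
     [b, b, a, c, b + e],
     [c, c, b, d, c],
     [a + d, d, c, a + e, a + d],
     [b + e, a + e, a + d, b, b + e],
     [c, b, b + e, c, c],
     [d, c, c, d, d]]
    5 f =
    [[a + e, a + d, a + d, a + e, a + e],
     [b + f, b + e, b + e, b + f, b + f],
     [c, c + f, c + f, c, a + c],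
     [d, d, d, d, b + d],
     [e, e, e, a + e, c + e],
     [a + f, a + f, f, b + f, a + d + f],
     [b, b, a, c, b + e],
     [c, c, b, d, c + f],
     [a + d, d, c, a + e, a + d],
     [b + e, a + e, a + d, b + f, b + e],
     [c + f, b + f, b + e, c, c + f],
     [d, c, c + f, d, d]] := by
  simp [voteStep, voteDeltas_eq, PySem.Int.mod, PySem.List.pySetD_of_nonneg,
    List.set, PySem.List.pyGetD_ofNat']

lemma vstep6 (a b c d e f g : Int) :
    voteStep
    [[a + e, a + d, a + d, a + e, a + e],
     [b + f, b + e, b + e, b + f, b + f],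
     [c, c + f, c + f, c, a + c],
     [d, d, d, d, b + d],
     [e, e, e, a + e, c + e],
     [a + f, a + f, f, b + f, a + d + f],
     [b, b, a, c, b + e],
     [c, c, b, d, c + f],
     [a + d, d, c, a + e, a + d],
     [b + e, a + e, a + d, b + f, b + e],
     [c + f, b + f, b + e, c, c + f],
     [d, c, c + f, d, d]]
    6 g =
    [[a + e, a + d, a + d + g, a + e, a + e],
     [b + f, b + e, b + e, b + f, b + f],
     [c + g, c + f, c + f, c + g, a + c + g],
     [d, d + g, d + g, d, b + d],
     [e, e, e, a + e, c + e],
     [a + f, a + f, f, b + f, a + d + f],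
     [b + g, b + g, a + g, c + g, b + e + g],
     [c, c, b, d, c + f],
     [a + d, d, c, a + e, a + d + g],
     [b + e, a + e, a + d, b + f, b + e],
     [c + f, b + f, b + e, c + g, c + f],
     [d + g, c + g, c + f, d, d + g]] := by
  simp [voteStep, voteDeltas_eq, PySem.Int.mod, PySem.List.pySetD_of_nonneg,
    List.set, PySem.List.pyGetD_ofNat']

lemma vstep7 (a b c d e f g i : Int) :
    voteStep
    [[a + e, a + d, a + d + g, a + e, a + e],
     [b + f, b + e, b + e, b + f, b + f],
     [c + g, c + f, c + f, c + g, a + c + g],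
     [d, d + g, d + g, d, b + d],
     [e, e, e, a + e, c + e],
     [a + f, a + f, f, b + f, a + d + f],
     [b + g, b + g, a + g, c + g, b + e + g],
     [c, c, b, d, c + f],
     [a + d, d, c, a + e, a + d + g],
     [b + e, a + e, a + d, b + f, b + e],
     [c + f, b + f, b + e, c + g, c + f],
     [d + g, c + g, c + f, d, d + g]]
    7 i =
    [[a + e + i, a + d + i, a + d + g, a + e, a + e + i],
     [b + f, b + e, b + e + i, b + f, b + f],
     [c + g, c + f, c + f, c + g, a + c + g],
     [d + i, d + g, d + g, d + i, b + d + i],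
     [e, e + i, e + i, a + e, c + e],
     [a + f, a + f, f, b + f, a + d + f],
     [b + g, b + g, a + g, c + g, b + e + g],
     [c + i, c + i, b + i, d + i, c + f + i],
     [a + d, d, c, a + e, a + d + g],
     [b + e, a + e, a + d, b + f, b + e + i],
     [c + f, b + f, b + e, c + g, c + f],
     [d + g, c + g, c + f, d + i, d + g]] := by
  simp [voteStep, voteDeltas_eq, PySem.Int.mod, PySem.List.pySetD_of_nonneg,
    List.set, PySem.List.pyGetD_ofNat']

lemma vstep8 (a b c d e f g i j : Int) :
    voteStep
    [[a + e + i, a + d + i, a + d + g, a + e, a + e + i],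
     [b + f, b + e, b + e + i, b + f, b + f],
     [c + g, c + f, c + f, c + g, a + c + g],
     [d + i, d + g, d + g, d + i, b + d + i],
     [e, e + i, e + i, a + e, c + e],
     [a + f, a + f, f, b + f, a + d + f],
     [b + g, b + g, a + g, c + g, b + e + g],
     [c + i, c + i, b + i, d + i, c + f + i],
     [a + d, d, c, a + e, a + d + g],
     [b + e, a + e, a + d, b + f, b + e + i],
     [c + f, b + f, b + e, c + g, c + f],
     [d + g, c + g, c + f, d + i, d + g]]
    8 j =
    [[a + e + i, a + d + i, a + d + g, a + e + j, a + e + i],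
     [b + f + j, b + e + j, b + e + i, b + f, b + f + j],
     [c + g, c + f, c + f + j, c + g, a + c + g],
     [d + i, d + g, d + g, d + i, b + d + i],
     [e + j, e + i, e + i, a + e + j, c + e + j],
     [a + f, a + f + j, f + j, b + f, a + d + f],
     [b + g, b + g, a + g, c + g, b + e + g],
     [c + i, c + i, b + i, d + i, c + f + i],
     [a + d + j, d + j, c + j, a + e + j, a + d + g + j],
     [b + e, a + e, a + d, b + f, b + e + i],
     [c + f, b + f, b + e, c + g, c + f + j],
     [d + g, c + g, c + f, d + i, d + g]] := by
  simp [voteStep, voteDeltas_eq, PySem.Int.mod, PySem.List.pySetD_of_nonneg,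
    List.set, PySem.List.pyGetD_ofNat']

lemma vstep9 (a b c d e f g i j k : Int) :
    voteStep
    [[a + e + i, a + d + i, a + d + g, a + e + j, a + e + i],
     [b + f + j, b + e + j, b + e + i, b + f, b + f + j],
     [c + g, c + f, c + f + j, c + g, a + c + g],
     [d + i, d + g, d + g, d + i, b + d + i],
     [e + j, e + i, e + i, a + e + j, c + e + j],
     [a + f, a + f + j, f + j, b + f, a + d + f],
     [b + g, b + g, a + g, c + g, b + e + g],
     [c + i, c + i, b + i, d + i, c + f + i],
     [a + d + j, d + j, c + j, a + e + j, a + d + g + j],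
     [b + e, a + e, a + d, b + f, b + e + i],
     [c + f, b + f, b + e, c + g, c + f + j],
     [d + g, c + g, c + f, d + i, d + g]]
    9 k =
    [[a + e + i, a + d + i, a + d + g, a + e + j, a + e + i],
     [b + f + j, b + e + j, b + e + i, b + f + k, b + f + j],
     [c + g + k, c + f + k, c + f + j, c + g, a + c + g + k],
     [d + i, d + g, d + g + k, d + i, b + d + i],
     [e + j, e + i, e + i, a + e + j, c + e + j],
     [a + f + k, a + f + j, f + j, b + f + k, a + d + f + k],
     [b + g, b + g + k, a + g + k, c + g, b + e + g],
     [c + i, c + i, b + i, d + i, c + f + i],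
     [a + d + j, d + j, c + j, a + e + j, a + d + g + j],
     [b + e + k, a + e + k, a + d + k, b + f + k, b + e + i + k],
     [c + f, b + f, b + e, c + g, c + f + j],
     [d + g, c + g, c + f, d + i, d + g + k]] := by
  simp [voteStep, voteDeltas_eq, PySem.Int.mod, PySem.List.pySetD_of_nonneg,
    List.set, PySem.List.pyGetD_ofNat']

lemma vstep10 (a b c d e f g i j k l : Int) :
    voteStep
    [[a + e + i, a + d + i, a + d + g, a + e + j, a + e + i],
     [b + f + j, b + e + j, b + e + i, b + f + k, b + f + j],
     [c + g + k, c + f + k, c + f + j, c + g, a + c + g + k],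
     [d + i, d + g, d + g + k, d + i, b + d + i],
     [e + j, e + i, e + i, a + e + j, c + e + j],
     [a + f + k, a + f + j, f + j, b + f + k, a + d + f + k],
     [b + g, b + g + k, a + g + k, c + g, b + e + g],
     [c + i, c + i, b + i, d + i, c + f + i],
     [a + d + j, d + j, c + j, a + e + j, a + d + g + j],
     [b + e + k, a + e + k, a + d + k, b + f + k, b + e + i + k],
     [c + f, b + f, b + e, c + g, c + f + j],
     [d + g, c + g, c + f, d + i, d + g + k]]
    10 l =
    [[a + e + i, a + d + i, a + d + g, a + e + j, a + e + i + l],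
     [b + f + j, b + e + j, b + e + i, b + f + k, b + f + j],
     [c + g + k, c + f + k, c + f + j, c + g + l, a + c + g + k],
     [d + i + l, d + g + l, d + g + k, d + i, b + d + i + l],
     [e + j, e + i, e + i + l, a + e + j, c + e + j],
     [a + f + k, a + f + j, f + j, b + f + k, a + d + f + k],
     [b + g + l, b + g + k, a + g + k, c + g + l, b + e + g + l],
     [c + i, c + i + l, b + i + l, d + i, c + f + i],
     [a + d + j, d + j, c + j, a + e + j, a + d + g + j],
     [b + e + k, a + e + k, a + d + k, b + f + k, b + e + i + k],
     [c + f + l, b + f + l, b + e + l, c + g + l, c + f + j + l],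
     [d + g, c + g, c + f, d + i, d + g + k]] := by
  simp [voteStep, voteDeltas_eq, PySem.Int.mod, PySem.List.pySetD_of_nonneg,
    List.set, PySem.List.pyGetD_ofNat']

lemma vstep11 (a b c d e f g i j k l m : Int) :
    voteStep
    [[a + e + i, a + d + i, a + d + g, a + e + j, a + e + i + l],
     [b + f + j, b + e + j, b + e + i, b + f + k, b + f + j],
     [c + g + k, c + f + k, c + f + j, c + g + l, a + c + g + k],
     [d + i + l, d + g + l, d + g + k, d + i, b + d + i + l],
     [e + j, e + i, e + i + l, a + e + j, c + e + j],
     [a + f + k, a + f + j, f + j, b + f + k, a + d + f + k],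
     [b + g + l, b + g + k, a + g + k, c + g + l, b + e + g + l],
     [c + i, c + i + l, b + i + l, d + i, c + f + i],
     [a + d + j, d + j, c + j, a + e + j, a + d + g + j],
     [b + e + k, a + e + k, a + d + k, b + f + k, b + e + i + k],
     [c + f + l, b + f + l, b + e + l, c + g + l, c + f + j + l],
     [d + g, c + g, c + f, d + i, d + g + k]]
    11 m =
    [[a + e + i, a + d + i, a + d + g, a + e + j, a + e + i + l],
     [b + f + j, b + e + j, b + e + i, b + f + k, b + f + j + m],
     [c + g + k, c + f + k, c + f + j, c + g + l, a + c + g + k],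
     [d + i + l, d + g + l, d + g + k, d + i + m, b + d + i + l],
     [e + j + m, e + i + m, e + i + l, a + e + j, c + e + j + m],
     [a + f + k, a + f + j, f + j + m, b + f + k, a + d + f + k],
     [b + g + l, b + g + k, a + g + k, c + g + l, b + e + g + l],
     [c + i + m, c + i + l, b + i + l, d + i + m, c + f + i + m],
     [a + d + j, d + j + m, c + j + m, a + e + j, a + d + g + j],
     [b + e + k, a + e + k, a + d + k, b + f + k, b + e + i + k],
     [c + f + l, b + f + l, b + e + l, c + g + l, c + f + j + l],
     [d + g + m, c + g + m, c + f + m, d + i + m, d + g + k + m]] := by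
  simp [voteStep, voteDeltas_eq, PySem.Int.mod, PySem.List.pySetD_of_nonneg,
    List.set, PySem.List.pyGetD_ofNat']

set_option maxRecDepth 10000 in
lemma tableB_eq (a b c d e f g i j k l m : Int) :
    tableB [a, b, c, d, e, f, g, i, j, k, l, m] = [[a + e + i, a + d + i, a + d + g, a + e + j, a + e + i + l],
     [b + f + j, b + e + j, b + e + i, b + f + k, b + f + j + m],
     [c + g + k, c + f + k, c + f + j, c + g + l, a + c + g + k],
     [d + i + l, d + g + l, d + g + k, d + i + m, b + d + i + l],
     [e + j + m, e + i + m, e + i + l, a + e + j, c + e + j + m],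
     [a + f + k, a + f + j, f + j + m, b + f + k, a + d + f + k],
     [b + g + l, b + g + k, a + g + k, c + g + l, b + e + g + l],
     [c + i + m, c + i + l, b + i + l, d + i + m, c + f + i + m],
     [a + d + j, d + j + m, c + j + m, a + e + j, a + d + g + j],
     [b + e + k, a + e + k, a + d + k, b + f + k, b + e + i + k],
     [c + f + l, b + f + l, b + e + l, c + g + l, c + f + j + l],
     [d + g + m, c + g + m, c + f + m, d + i + m, d + g + k + m]] := by
  have hch : tableB [a, b, c, d, e, f, g, i, j, k, l, m] = (voteStep (voteStep (voteStep (voteStep (voteStep (voteStep (voteStep (voteStep (voteStep (voteStep (voteStep (voteStep (List.replicate 12 (List.replicate 5 (0 : Int))) 0 a) 1 b) 2 c) 3 d) 4 e) 5 f) 6 g) 7 i) 8 j) 9 k) 10 l) 11 m) := by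
    simp only [tableB, voteStep, PySem.List.enumerate_cons, PySem.List.enumerate_nil,
      List.foldl_cons, List.foldl_nil, Int.reduceAdd]
  rw [hch, show List.replicate 12 (List.replicate 5 (0 : Int)) =
    ([[0, 0, 0, 0, 0],
     [0, 0, 0, 0, 0],
     [0, 0, 0, 0, 0],
     [0, 0, 0, 0, 0],
     [0, 0, 0, 0, 0],
     [0, 0, 0, 0, 0],
     [0, 0, 0, 0, 0],
     [0, 0, 0, 0, 0],
     [0, 0, 0, 0, 0],
     [0, 0, 0, 0, 0],
     [0, 0, 0, 0, 0],
     [0, 0, 0, 0, 0]] : List (List Int)) from rfl,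
    vstep0, vstep1, vstep2, vstep3, vstep4, vstep5, vstep6, vstep7, vstep8,
    vstep9, vstep10, vstep11]

lemma candB2_eq (a b c d e f g i j k l m : Int) :
    candB2 [a, b, c, d, e, f, g, i, j, k, l, m] = canonCands a b c d e f g i j k l m := by
  simp only [candB2]
  rw [tableB_eq]
  simp [pyRange12_eq, pyRange5_eq, PySem.List.pyGetD_ofNat', canonCands]

lemma candA_eq (a b c d e f g i j k l m : Int) :
    candA [a, b, c, d, e, f, g, i, j, k, l, m] = canonCands a b c d e f g i j k l m := by
  show ([(0 + a * 1 + b * 0 + c * 0 + d * 0 + e * 1 + f * 0 + g * 0 + i * 1 + j * 0 + k * 0 + l * 0 + m * 0, 0, 0),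
 (0 + a * 1 + b * 0 + c * 0 + d * 1 + e * 0 + f * 0 + g * 0 + i * 1 + j * 0 + k * 0 + l * 0 + m * 0, 0, 1),
 (0 + a * 1 + b * 0 + c * 0 + d * 1 + e * 0 + f * 0 + g * 1 + i * 0 + j * 0 + k * 0 + l * 0 + m * 0, 0, 2),
 (0 + a * 1 + b * 0 + c * 0 + d * 0 + e * 1 + f * 0 + g * 0 + i * 0 + j * 1 + k * 0 + l * 0 + m * 0, 0, 3),
 (0 + a * 1 + b * 0 + c * 0 + d * 0 + e * 1 + f * 0 + g * 0 + i * 1 + j * 0 + k * 0 + l * 1 + m * 0, 0, 4),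
 (0 + a * 0 + b * 1 + c * 0 + d * 0 + e * 0 + f * 1 + g * 0 + i * 0 + j * 1 + k * 0 + l * 0 + m * 0, 1, 0),
 (0 + a * 0 + b * 1 + c * 0 + d * 0 + e * 1 + f * 0 + g * 0 + i * 0 + j * 1 + k * 0 + l * 0 + m * 0, 1, 1),
 (0 + a * 0 + b * 1 + c * 0 + d * 0 + e * 1 + f * 0 + g * 0 + i * 1 + j * 0 + k * 0 + l * 0 + m * 0, 1, 2),
 (0 + a * 0 + b * 1 + c * 0 + d * 0 + e * 0 + f * 1 + g * 0 + i * 0 + j * 0 + k * 1 + l * 0 + m * 0, 1, 3),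
 (0 + a * 0 + b * 1 + c * 0 + d * 0 + e * 0 + f * 1 + g * 0 + i * 0 + j * 1 + k * 0 + l * 0 + m * 1, 1, 4),
 (0 + a * 0 + b * 0 + c * 1 + d * 0 + e * 0 + f * 0 + g * 1 + i * 0 + j * 0 + k * 1 + l * 0 + m * 0, 2, 0),
 (0 + a * 0 + b * 0 + c * 1 + d * 0 + e * 0 + f * 1 + g * 0 + i * 0 + j * 0 + k * 1 + l * 0 + m * 0, 2, 1),
 (0 + a * 0 + b * 0 + c * 1 + d * 0 + e * 0 + f * 1 + g * 0 + i * 0 + j * 1 + k * 0 + l * 0 + m * 0, 2, 2),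
 (0 + a * 0 + b * 0 + c * 1 + d * 0 + e * 0 + f * 0 + g * 1 + i * 0 + j * 0 + k * 0 + l * 1 + m * 0, 2, 3),
 (0 + a * 1 + b * 0 + c * 1 + d * 0 + e * 0 + f * 0 + g * 1 + i * 0 + j * 0 + k * 1 + l * 0 + m * 0, 2, 4),
 (0 + a * 0 + b * 0 + c * 0 + d * 1 + e * 0 + f * 0 + g * 0 + i * 1 + j * 0 + k * 0 + l * 1 + m * 0, 3, 0),
 (0 + a * 0 + b * 0 + c * 0 + d * 1 + e * 0 + f * 0 + g * 1 + i * 0 + j * 0 + k * 0 + l * 1 + m * 0, 3, 1),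
 (0 + a * 0 + b * 0 + c * 0 + d * 1 + e * 0 + f * 0 + g * 1 + i * 0 + j * 0 + k * 1 + l * 0 + m * 0, 3, 2),
 (0 + a * 0 + b * 0 + c * 0 + d * 1 + e * 0 + f * 0 + g * 0 + i * 1 + j * 0 + k * 0 + l * 0 + m * 1, 3, 3),
 (0 + a * 0 + b * 1 + c * 0 + d * 1 + e * 0 + f * 0 + g * 0 + i * 1 + j * 0 + k * 0 + l * 1 + m * 0, 3, 4),
 (0 + a * 0 + b * 0 + c * 0 + d * 0 + e * 1 + f * 0 + g * 0 + i * 0 + j * 1 + k * 0 + l * 0 + m * 1, 4, 0),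
 (0 + a * 0 + b * 0 + c * 0 + d * 0 + e * 1 + f * 0 + g * 0 + i * 1 + j * 0 + k * 0 + l * 0 + m * 1, 4, 1),
 (0 + a * 0 + b * 0 + c * 0 + d * 0 + e * 1 + f * 0 + g * 0 + i * 1 + j * 0 + k * 0 + l * 1 + m * 0, 4, 2),
 (0 + a * 1 + b * 0 + c * 0 + d * 0 + e * 1 + f * 0 + g * 0 + i * 0 + j * 1 + k * 0 + l * 0 + m * 0, 4, 3),
 (0 + a * 0 + b * 0 + c * 1 + d * 0 + e * 1 + f * 0 + g * 0 + i * 0 + j * 1 + k * 0 + l * 0 + m * 1, 4, 4),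
 (0 + a * 1 + b * 0 + c * 0 + d * 0 + e * 0 + f * 1 + g * 0 + i * 0 + j * 0 + k * 1 + l * 0 + m * 0, 5, 0),
 (0 + a * 1 + b * 0 + c * 0 + d * 0 + e * 0 + f * 1 + g * 0 + i * 0 + j * 1 + k * 0 + l * 0 + m * 0, 5, 1),
 (0 + a * 0 + b * 0 + c * 0 + d * 0 + e * 0 + f * 1 + g * 0 + i * 0 + j * 1 + k * 0 + l * 0 + m * 1, 5, 2),
 (0 + a * 0 + b * 1 + c * 0 + d * 0 + e * 0 + f * 1 + g * 0 + i * 0 + j * 0 + k * 1 + l * 0 + m * 0, 5, 3),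
 (0 + a * 1 + b * 0 + c * 0 + d * 1 + e * 0 + f * 1 + g * 0 + i * 0 + j * 0 + k * 1 + l * 0 + m * 0, 5, 4),
 (0 + a * 0 + b * 1 + c * 0 + d * 0 + e * 0 + f * 0 + g * 1 + i * 0 + j * 0 + k * 0 + l * 1 + m * 0, 6, 0),
 (0 + a * 0 + b * 1 + c * 0 + d * 0 + e * 0 + f * 0 + g * 1 + i * 0 + j * 0 + k * 1 + l * 0 + m * 0, 6, 1),
 (0 + a * 1 + b * 0 + c * 0 + d * 0 + e * 0 + f * 0 + g * 1 + i * 0 + j * 0 + k * 1 + l * 0 + m * 0, 6, 2),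
 (0 + a * 0 + b * 0 + c * 1 + d * 0 + e * 0 + f * 0 + g * 1 + i * 0 + j * 0 + k * 0 + l * 1 + m * 0, 6, 3),
 (0 + a * 0 + b * 1 + c * 0 + d * 0 + e * 1 + f * 0 + g * 1 + i * 0 + j * 0 + k * 0 + l * 1 + m * 0, 6, 4),
 (0 + a * 0 + b * 0 + c * 1 + d * 0 + e * 0 + f * 0 + g * 0 + i * 1 + j * 0 + k * 0 + l * 0 + m * 1, 7, 0),
 (0 + a * 0 + b * 0 + c * 1 + d * 0 + e * 0 + f * 0 + g * 0 + i * 1 + j * 0 + k * 0 + l * 1 + m * 0, 7, 1),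
 (0 + a * 0 + b * 1 + c * 0 + d * 0 + e * 0 + f * 0 + g * 0 + i * 1 + j * 0 + k * 0 + l * 1 + m * 0, 7, 2),
 (0 + a * 0 + b * 0 + c * 0 + d * 1 + e * 0 + f * 0 + g * 0 + i * 1 + j * 0 + k * 0 + l * 0 + m * 1, 7, 3),
 (0 + a * 0 + b * 0 + c * 1 + d * 0 + e * 0 + f * 1 + g * 0 + i * 1 + j * 0 + k * 0 + l * 0 + m * 1, 7, 4),
 (0 + a * 1 + b * 0 + c * 0 + d * 1 + e * 0 + f * 0 + g * 0 + i * 0 + j * 1 + k * 0 + l * 0 + m * 0, 8, 0),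
 (0 + a * 0 + b * 0 + c * 0 + d * 1 + e * 0 + f * 0 + g * 0 + i * 0 + j * 1 + k * 0 + l * 0 + m * 1, 8, 1),
 (0 + a * 0 + b * 0 + c * 1 + d * 0 + e * 0 + f * 0 + g * 0 + i * 0 + j * 1 + k * 0 + l * 0 + m * 1, 8, 2),
 (0 + a * 1 + b * 0 + c * 0 + d * 0 + e * 1 + f * 0 + g * 0 + i * 0 + j * 1 + k * 0 + l * 0 + m * 0, 8, 3),
 (0 + a * 1 + b * 0 + c * 0 + d * 1 + e * 0 + f * 0 + g * 1 + i * 0 + j * 1 + k * 0 + l * 0 + m * 0, 8, 4),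
 (0 + a * 0 + b * 1 + c * 0 + d * 0 + e * 1 + f * 0 + g * 0 + i * 0 + j * 0 + k * 1 + l * 0 + m * 0, 9, 0),
 (0 + a * 1 + b * 0 + c * 0 + d * 0 + e * 1 + f * 0 + g * 0 + i * 0 + j * 0 + k * 1 + l * 0 + m * 0, 9, 1),
 (0 + a * 1 + b * 0 + c * 0 + d * 1 + e * 0 + f * 0 + g * 0 + i * 0 + j * 0 + k * 1 + l * 0 + m * 0, 9, 2),
 (0 + a * 0 + b * 1 + c * 0 + d * 0 + e * 0 + f * 1 + g * 0 + i * 0 + j * 0 + k * 1 + l * 0 + m * 0, 9, 3),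
 (0 + a * 0 + b * 1 + c * 0 + d * 0 + e * 1 + f * 0 + g * 0 + i * 1 + j * 0 + k * 1 + l * 0 + m * 0, 9, 4),
 (0 + a * 0 + b * 0 + c * 1 + d * 0 + e * 0 + f * 1 + g * 0 + i * 0 + j * 0 + k * 0 + l * 1 + m * 0, 10, 0),
 (0 + a * 0 + b * 1 + c * 0 + d * 0 + e * 0 + f * 1 + g * 0 + i * 0 + j * 0 + k * 0 + l * 1 + m * 0, 10, 1),
 (0 + a * 0 + b * 1 + c * 0 + d * 0 + e * 1 + f * 0 + g * 0 + i * 0 + j * 0 + k * 0 + l * 1 + m * 0, 10, 2),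
 (0 + a * 0 + b * 0 + c * 1 + d * 0 + e * 0 + f * 0 + g * 1 + i * 0 + j * 0 + k * 0 + l * 1 + m * 0, 10, 3),
 (0 + a * 0 + b * 0 + c * 1 + d * 0 + e * 0 + f * 1 + g * 0 + i * 0 + j * 1 + k * 0 + l * 1 + m * 0, 10, 4),
 (0 + a * 0 + b * 0 + c * 0 + d * 1 + e * 0 + f * 0 + g * 1 + i * 0 + j * 0 + k * 0 + l * 0 + m * 1, 11, 0),
 (0 + a * 0 + b * 0 + c * 1 + d * 0 + e * 0 + f * 0 + g * 1 + i * 0 + j * 0 + k * 0 + l * 0 + m * 1, 11, 1),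
 (0 + a * 0 + b * 0 + c * 1 + d * 0 + e * 0 + f * 1 + g * 0 + i * 0 + j * 0 + k * 0 + l * 0 + m * 1, 11, 2),
 (0 + a * 0 + b * 0 + c * 0 + d * 1 + e * 0 + f * 0 + g * 0 + i * 1 + j * 0 + k * 0 + l * 0 + m * 1, 11, 3),
 (0 + a * 0 + b * 0 + c * 0 + d * 1 + e * 0 + f * 0 + g * 1 + i * 0 + j * 0 + k * 1 + l * 0 + m * 1, 11, 4)] : List (Int × Int × Int)) = ([(a + e + i, 0, 0),
 (a + d + i, 0, 1),
 (a + d + g, 0, 2),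
 (a + e + j, 0, 3),
 (a + e + i + l, 0, 4),
 (b + f + j, 1, 0),
 (b + e + j, 1, 1),
 (b + e + i, 1, 2),
 (b + f + k, 1, 3),
 (b + f + j + m, 1, 4),
 (c + g + k, 2, 0),
 (c + f + k, 2, 1),
 (c + f + j, 2, 2),
 (c + g + l, 2, 3),
 (a + c + g + k, 2, 4),
 (d + i + l, 3, 0),
 (d + g + l, 3, 1),
 (d + g + k, 3, 2),
 (d + i + m, 3, 3),
 (b + d + i + l, 3, 4),
 (e + j + m, 4, 0),
 (e + i + m, 4, 1),
 (e + i + l, 4, 2),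
 (a + e + j, 4, 3),
 (c + e + j + m, 4, 4),
 (a + f + k, 5, 0),
 (a + f + j, 5, 1),
 (f + j + m, 5, 2),
 (b + f + k, 5, 3),
 (a + d + f + k, 5, 4),
 (b + g + l, 6, 0),
 (b + g + k, 6, 1),
 (a + g + k, 6, 2),
 (c + g + l, 6, 3),
 (b + e + g + l, 6, 4),
 (c + i + m, 7, 0),
 (c + i + l, 7, 1),
 (b + i + l, 7, 2),
 (d + i + m, 7, 3),
 (c + f + i + m, 7, 4),
 (a + d + j, 8, 0),
 (d + j + m, 8, 1),
 (c + j + m, 8, 2),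
 (a + e + j, 8, 3),
 (a + d + g + j, 8, 4),
 (b + e + k, 9, 0),
 (a + e + k, 9, 1),
 (a + d + k, 9, 2),
 (b + f + k, 9, 3),
 (b + e + i + k, 9, 4),
 (c + f + l, 10, 0),
 (b + f + l, 10, 1),
 (b + e + l, 10, 2),
 (c + g + l, 10, 3),
 (c + f + j + l, 10, 4),
 (d + g + m, 11, 0),
 (c + g + m, 11, 1),
 (c + f + m, 11, 2),
 (d + i + m, 11, 3),
 (d + g + k + m, 11, 4)] : List (Int × Int × Int))
  simp only [List.cons.injEq, Prod.mk.injEq, and_true]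
  norm_num

lemma canon_nonneg (a b c d e f g i j k l m : Int) (ha : 0 ≤ a) (hb : 0 ≤ b) (hc : 0 ≤ c) (hd : 0 ≤ d) (he : 0 ≤ e) (hf : 0 ≤ f) (hg : 0 ≤ g) (hi : 0 ≤ i) (hj : 0 ≤ j) (hk : 0 ≤ k) (hl : 0 ≤ l) (hm : 0 ≤ m) :
    ∀ cc ∈ canonCands a b c d e f g i j k l m, 0 ≤ cc.1 := by
  intro cc hcc
  simp only [canonCands, List.mem_cons, List.not_mem_nil, or_false] at hcc
  rcases hcc with rfl|rfl|rfl|rfl|rfl|rfl|rfl|rfl|rfl|rfl|rfl|rfl|rfl|rfl|rfl|rfl|rfl|rfl|rfl|rfl|rfl|rfl|rfl|rfl|rfl|rfl|rfl|rfl|rfl|rfl|rfl|rfl|rfl|rfl|rfl|rfl|rfl|rfl|rfl|rfl|rfl|rfl|rfl|rfl|rfl|rfl|rfl|rfl|rfl|rfl|rfl|rfl|rfl|rfl|rfl|rfl|rfl|rfl|rfl|rfl <;> dsimp only <;> omega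

-- the histogram loop preserves length 12 and nonnegativity of all entries
lemma hist_inv (pitches : List Int) (init : List Int) (hl : init.length = 12)
    (hn : ∀ x ∈ init, 0 ≤ x) :
    (pitches.foldl
      (fun h p => PySem.List.pySetD h (PySem.Int.mod p 12)
        (PySem.List.pyGetD h (PySem.Int.mod p 12) 0 + 1)) init).length = 12 ∧
    ∀ x ∈ pitches.foldl
      (fun h p => PySem.List.pySetD h (PySem.Int.mod p 12)
        (PySem.List.pyGetD h (PySem.Int.mod p 12) 0 + 1)) init, 0 ≤ x := by
  induction pitches generalizing init with
  | nil => exact ⟨hl, hn⟩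
  | cons p ps ih =>
      have h0 : (0 : Int) ≤ PySem.Int.mod p 12 := PySem.Int.mod_nonneg p (by norm_num)
      have h12 : PySem.Int.mod p 12 < 12 := PySem.Int.mod_lt p (by norm_num)
      have hinr : PySem.Raise.InRange init.length (PySem.Int.mod p 12) := by
        constructor <;> [omega; (rw [hl]; exact_mod_cast h12)]
      have hstep := PySem.List.pySetD_of_nonneg (xs := init)
        (v := PySem.List.pyGetD init (PySem.Int.mod p 12) 0 + 1) h0
      simp only [List.foldl_cons]
      apply ih
      · rw [hstep, List.length_set, hl]
      · intro x hx
        rw [hstep] at hx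
        rcases List.mem_or_eq_of_mem_set hx with hmem | rfl
        · exact hn x hmem
        · have := hn _ (PySem.List.pyGetD_mem init (0 : Int) hinr)
          omega

-- PySem.List.max? started on a nonempty list is the strict-'>' running-best fold
lemma max?_cons_eq (c0 : Int × Int × Int) (rest : List (Int × Int × Int)) :
    PySem.List.max? (c0 :: rest) (fun c => c.1)
      = some (rest.foldl (fun st c => if c.1 > st.1 then c else st) c0) := by
  induction rest generalizing c0 with
  | nil => rfl
  | cons x xs ih =>
      show PySem.List.max? (c0 :: x :: xs) (fun c => c.1) = _
      have step : PySem.List.max? (c0 :: x :: xs) (fun c => c.1)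
          = PySem.List.max? ((if c0.1 < x.1 then x else c0) :: xs) (fun c => c.1) := by
        simp only [PySem.List.max?, List.foldl_cons]
        by_cases hlt : c0.1 < x.1 <;> simp [hlt]
      rw [step, ih]
      simp only [List.foldl_cons, gt_iff_lt]

-- selecting over A's flattened candidate list equals B's max?-over-table shape
lemma res_eq (h : List Int) (hl : h.length = 12) (hn : ∀ x ∈ h, 0 ≤ x) :
    (let best := (candA h).foldl (fun st c => if c.1 > st.1 then c else st) ((-1 : Int), (0 : Int), (0 : Int));
     if best.1 ≥ 2 then some (best.2.1, best.2.2) else none)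
    = match PySem.List.max? (candB2 h) (fun c => c.1) with
      | some (s, r, q) => if s ≥ 2 then some (r, q) else none
      | none => (none : Option (Int × Int)) := by
  obtain _ | ⟨a, h⟩ := h; · exact absurd hl (by simp)
  obtain _ | ⟨b, h⟩ := h; · exact absurd hl (by simp)
  obtain _ | ⟨c, h⟩ := h; · exact absurd hl (by simp)
  obtain _ | ⟨d, h⟩ := h; · exact absurd hl (by simp)
  obtain _ | ⟨e, h⟩ := h; · exact absurd hl (by simp)
  obtain _ | ⟨f, h⟩ := h; · exact absurd hl (by simp)
  obtain _ | ⟨g, h⟩ := h; · exact absurd hl (by simp)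
  obtain _ | ⟨i, h⟩ := h; · exact absurd hl (by simp)
  obtain _ | ⟨j, h⟩ := h; · exact absurd hl (by simp)
  obtain _ | ⟨k, h⟩ := h; · exact absurd hl (by simp)
  obtain _ | ⟨l, h⟩ := h; · exact absurd hl (by simp)
  obtain _ | ⟨m, h⟩ := h; · exact absurd hl (by simp)
  obtain _ | ⟨x, h⟩ := h
  · have hA := candA_eq a b c d e f g i j k l m
    have hB := candB2_eq a b c d e f g i j k l m
    rw [hA, hB]
    have hnn : ∀ cc ∈ canonCands a b c d e f g i j k l m, 0 ≤ cc.1 :=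
      canon_nonneg a b c d e f g i j k l m (hn a (by simp)) (hn b (by simp)) (hn c (by simp)) (hn d (by simp)) (hn e (by simp)) (hn f (by simp)) (hn g (by simp)) (hn i (by simp)) (hn j (by simp)) (hn k (by simp)) (hn l (by simp)) (hn m (by simp))
    cases hc : canonCands a b c d e f g i j k l m with
    | nil => exact absurd hc (by simp [canonCands])
    | cons c0 rest =>
        have hc0 : (0 : Int) ≤ c0.1 := hnn c0 (hc ▸ List.mem_cons_self)
        rw [max?_cons_eq]
        simp only [List.foldl_cons]
        rw [if_pos (show c0.1 > ((-1 : Int), (0 : Int), (0 : Int)).1 by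
          simp only [gt_iff_lt]; omega)]
  · exact absurd hl (by simp)

-- A flattened: the nested root/template loops are one fold over candA
lemma portA_flat (pitches : List Int) (hlen : ¬ pitches.length < 2) :
    detect_chord pitches =
      (let h := pitches.foldl
        (fun h p => PySem.List.pySetD h (PySem.Int.mod p 12)
          (PySem.List.pyGetD h (PySem.Int.mod p 12) 0 + 1))
        (List.replicate 12 (0 : Int));
       let best := (candA h).foldl (fun st c => if c.1 > st.1 then c else st) ((-1 : Int), (0 : Int), (0 : Int));
       if best.1 ≥ 2 then some (best.2.1, best.2.2) else none) := by
  simp only [detect_chord, if_neg hlen, candA, List.foldl_flatMap, List.foldl_map]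

lemma portB_flat (pitches : List Int) (hlen : ¬ pitches.length < 2) :
    detect_chord_alt pitches =
      (let h := pitches.foldl
        (fun h p => PySem.List.pySetD h (PySem.Int.mod p 12)
          (PySem.List.pyGetD h (PySem.Int.mod p 12) 0 + 1))
        (List.replicate 12 (0 : Int));
       match PySem.List.max? (candB2 h) (fun c => c.1) with
       | some (s, r, q) => if s ≥ 2 then some (r, q) else none
       | none => none) := by
  simp only [detect_chord_alt, if_neg hlen, candB2, tableB]

-- ===== VERDICT (by name: the statement is the Claim_ definition above) =====
theorem detect_chord_spec : Claim_equal_detect_chord := by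
  intro pitches _
  unfold Spec_detect_chord
  by_cases hlen : pitches.length < 2
  · simp [detect_chord, detect_chord_alt, hlen]
  · rw [portA_flat pitches hlen, portB_flat pitches hlen]
    obtain ⟨hl, hn⟩ := hist_inv pitches (List.replicate 12 0) (by simp) (by simp)
    generalize hH : pitches.foldl
      (fun h p => PySem.List.pySetD h (PySem.Int.mod p 12)
        (PySem.List.pyGetD h (PySem.Int.mod p 12) 0 + 1))
      (List.replicate 12 (0 : Int)) = h at hl hn ⊢
    exact res_eq h hl hn
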